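-- pv_equiv track=rewrite | github.com/MichalKowalski876/Python-misc | Transpose_cipher/code-decode_inter.py | decode_trans
-- ===== SOURCE A (Python) =====
-- def decode_trans(var):
--     res = [''] * len(var)
--     lewa = 0
--     prawa = len(var) - 1
--     i = 0
--
--     while lewa < prawa:
--         res[lewa] = var[i]
--         res[prawa] = var[i+1]
--         i += 2
--         lewa += 1
--         prawa -=1
--
--     if lewa == prawa:
--         res[lewa] = var[i]
--     return ''.join(res)
-- ===== SOURCE B (Python) =====
-- def decode_trans(var):
--     front = []
--     back = []
--     for idx, ch in enumerate(var):
--         if idx % 2 == 0: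
--             front.append(ch)
--         else:
--             back.append(ch)
--     return ''.join(front) + ''.join(reversed(back))
-- ===== Notes on version B (the rewrite author's own statement) =====
-- stated objective: simpler
-- what changed: Instead of preallocating a result array and filling it with a two-pointer while-loop plus a separate middle-element fixup, B makes one forward pass that partitions characters by index parity and concatenates the even-indexed ones with the reversed odd-indexed ones.
import Mathlib
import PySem

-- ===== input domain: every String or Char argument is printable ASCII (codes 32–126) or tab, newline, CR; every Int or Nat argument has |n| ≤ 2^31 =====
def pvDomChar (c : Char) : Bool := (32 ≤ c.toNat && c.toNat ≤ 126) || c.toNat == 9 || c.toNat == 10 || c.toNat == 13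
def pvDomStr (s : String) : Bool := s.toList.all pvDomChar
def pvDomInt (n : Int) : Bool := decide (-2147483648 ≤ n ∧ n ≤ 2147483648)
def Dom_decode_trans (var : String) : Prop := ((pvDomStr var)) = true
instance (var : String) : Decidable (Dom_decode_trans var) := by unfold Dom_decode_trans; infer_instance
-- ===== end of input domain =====

-- B replaces A's preallocated array + two-pointer while-loop by a single forward pass that
-- partitions characters by index parity and concatenates evens with the reversed odds (objective: simpler).

-- ===== PORT A =====
-- var[i] (a 1-char string); indices are always in range wherever A evaluates it, so the total form pyGetD is exact here
def pvCharAt (cs : List Char) (i : Int) : String :=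
  String.ofList [PySem.List.pyGetD cs i ' ']

-- the while-loop: state (res, lewa, prawa, i), returned when lewa < prawa fails
def pvLoopA (cs : List Char) (res : List String) (lewa prawa i : Int) :
    List String × Int × Int × Int :=
  if lewa < prawa then
    pvLoopA cs
      (PySem.List.pySetD (PySem.List.pySetD res lewa (pvCharAt cs i)) prawa (pvCharAt cs (i+1)))
      (lewa + 1) (prawa - 1) (i + 2)
  else (res, lewa, prawa, i)
termination_by (prawa - lewa).toNat
decreasing_by omega

def decode_trans (var : String) : String :=
  let cs := var.toList
  let p := pvLoopA cs (List.replicate cs.length "") 0 ((cs.length : Int) - 1) 0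
  let res := if p.2.1 == p.2.2.1 then PySem.List.pySetD p.1 p.2.1 (pvCharAt cs p.2.2.2) else p.1
  PySem.Str.join "" res

-- ===== PORT B =====
def decode_trans_alt (var : String) : String :=
  let fb := (PySem.List.enumerate var.toList).foldl
    (fun (fb : List Char × List Char) (p : Int × Char) =>
      if PySem.Int.mod p.1 2 == 0 then (fb.1 ++ [p.2], fb.2) else (fb.1, fb.2 ++ [p.2]))
    ([], [])
  -- ''.join(front) + ''.join(reversed(back)) : one char-list concatenation
  String.ofList (fb.1 ++ fb.2.reverse)

-- ===== PRECONDITION & SPEC =====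
def Spec_decode_trans (var : String) (out : String) : Prop := out = decode_trans_alt var
instance (var : String) (out : String) : Decidable (Spec_decode_trans var out) := by unfold Spec_decode_trans; infer_instance

-- ===== CLAIM (what is proved, stated in full; the proofs are below) =====
def Claim_equal_decode_trans : Prop := ∀ (var : String), Dom_decode_trans var → Spec_decode_trans var (decode_trans var)

-- ===== LEMMAS AND PROOFS =====

-- the decoded character list, recursively: first char to the front, second to the back
def pvDec : List Char → List Char
  | [] => []
  | [a] => [a]
  | a :: b :: r => a :: (pvDec r ++ [b])

def pvEv : List Char → List Char
  | [] => []
  | [a] => [a]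
  | a :: _ :: r => a :: pvEv r

def pvOd : List Char → List Char
  | [] => []
  | [_] => []
  | _ :: b :: r => b :: pvOd r

theorem pvDec_eq_ev_od (l : List Char) : pvDec l = pvEv l ++ (pvOd l).reverse := by
  induction l using pvDec.induct with
  | case1 => rfl
  | case2 a => rfl
  | case3 a b r ih => simp [pvDec, pvEv, pvOd, ih]

theorem set_replicate_last {α : Type} (n : Nat) (a b : α) :
    (List.replicate (n+1) a).set n b = List.replicate n a ++ [b] := by
  induction n with
  | zero => rfl
  | succ k ih => simpa [List.replicate_succ] using ih

theorem pvLoopA_spec (m : Nat) : ∀ (cs : List Char) (pre suf : List String) (i : Nat),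
    i + m ≤ cs.length →
    (fun p : List String × Int × Int × Int =>
        if p.2.1 == p.2.2.1 then PySem.List.pySetD p.1 p.2.1 (pvCharAt cs p.2.2.2) else p.1)
      (pvLoopA cs (pre ++ (List.replicate m "" ++ suf)) (pre.length : Int)
        ((pre.length : Int) + m - 1) (i : Int))
    = pre ++ ((pvDec ((cs.drop i).take m)).map (fun c => String.ofList [c]) ++ suf) := by
  induction m using Nat.strong_induction_on with
  | _ m ih =>
  match m with
  | 0 =>
    intro cs pre suf i hlen
    rw [pvLoopA]
    rw [if_neg (by omega)]
    simp only [beq_iff_eq]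
    rw [if_neg (by omega)]
    simp [pvDec]
  | 1 =>
    intro cs pre suf i hlen
    have hi : i < cs.length := by omega
    rw [pvLoopA]
    rw [if_neg (by omega)]
    simp only [beq_iff_eq]
    rw [if_pos (by omega)]
    have hdrop : cs.drop i = cs[i] :: cs.drop (i+1) := List.drop_eq_getElem_cons hi
    have hchar : pvCharAt cs (i : Int) = String.ofList [cs[i]] := by
      simp [pvCharAt, PySem.List.pyGetD_natCast, List.getD_eq_getElem, hi]
    rw [PySem.List.pySetD_natCast, List.set_append, if_neg (by omega)]
    have h0 : pre.length - pre.length = 0 := by omega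
    rw [h0, hdrop, List.take_succ_cons, List.take_zero]
    simp only [pvDec, List.map_cons, List.map_nil, List.replicate_succ, List.replicate_zero,
      List.nil_append, List.cons_append, List.set_cons_zero, hchar]
  | m' + 2 =>
    intro cs pre suf i hlen
    have hi : i < cs.length := by omega
    have hi1 : i + 1 < cs.length := by omega
    have hchar : pvCharAt cs (i : Int) = String.ofList [cs[i]] := by
      simp [pvCharAt, PySem.List.pyGetD_natCast, List.getD_eq_getElem, hi]
    have hchar1 : pvCharAt cs ((i : Int) + 1) = String.ofList [cs[i+1]] := by
      have h1 : (i : Int) + 1 = ((i + 1 : Nat) : Int) := by push_cast; ring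
      simp only [pvCharAt]
      rw [h1, PySem.List.pyGetD_natCast]
      simp [List.getD_eq_getElem, hi1]
    rw [pvLoopA]
    rw [if_pos (by push_cast; omega)]
    -- the two assignments of the iteration
    have hset1 : PySem.List.pySetD (pre ++ (List.replicate (m'+2) "" ++ suf))
        (pre.length : Int) (pvCharAt cs (i : Int))
        = pre ++ (pvCharAt cs (i : Int) :: (List.replicate (m'+1) "" ++ suf)) := by
      rw [PySem.List.pySetD_natCast]
      simp [List.set_append, List.replicate_succ]
    have hcast2 : (pre.length : Int) + (m'+2 : Nat) - 1 = ((pre.length + m' + 1 : Nat) : Int) := by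
      push_cast; ring
    have hset2 : PySem.List.pySetD (pre ++ (pvCharAt cs (i : Int) :: (List.replicate (m'+1) "" ++ suf)))
        ((pre.length : Int) + (m'+2 : Nat) - 1) (pvCharAt cs ((i : Int) + 1))
        = pre ++ (pvCharAt cs (i : Int) :: (List.replicate m' "" ++ (pvCharAt cs ((i : Int) + 1) :: suf))) := by
      rw [hcast2, PySem.List.pySetD_natCast]
      rw [List.set_append, if_neg (by omega)]
      have : pre.length + m' + 1 - pre.length = m' + 1 := by omega
      rw [this, List.set_cons_succ, List.set_append, if_pos (by simp), set_replicate_last]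
      simp [List.append_assoc]
    rw [hset1, hset2]
    -- reshape to the induction hypothesis at m', pre ++ [sa], sb :: suf, i + 2
    have hres : pre ++ (pvCharAt cs (i : Int) :: (List.replicate m' "" ++ (pvCharAt cs ((i : Int) + 1) :: suf)))
        = (pre ++ [pvCharAt cs (i : Int)]) ++ (List.replicate m' "" ++ (pvCharAt cs ((i : Int) + 1) :: suf)) := by
      simp
    have hL1 : (pre.length : Int) + 1 = (((pre ++ [pvCharAt cs (i : Int)]).length : Nat) : Int) := by
      simp
    have hR1 : (pre.length : Int) + (m'+2 : Nat) - 1 - 1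
        = (((pre ++ [pvCharAt cs (i : Int)]).length : Nat) : Int) + (m' : Nat) - 1 := by
      simp; ring
    have hI1 : (i : Int) + 2 = ((i + 2 : Nat) : Int) := by push_cast; ring
    rw [hres, hL1, hR1, hI1]
    rw [ih m' (by omega) cs (pre ++ [pvCharAt cs (i : Int)]) (pvCharAt cs ((i : Int) + 1) :: suf) (i+2) (by omega)]
    -- now compute the right-hand side
    have hdrop : cs.drop i = cs[i] :: cs.drop (i+1) := List.drop_eq_getElem_cons hi
    have hdrop1 : cs.drop (i+1) = cs[i+1] :: cs.drop (i+2) := List.drop_eq_getElem_cons hi1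
    rw [hdrop, hdrop1, List.take_succ_cons, List.take_succ_cons]
    simp only [pvDec, List.map_cons, List.map_append, List.map_nil, List.cons_append,
      List.nil_append, List.append_assoc, hchar, hchar1]

theorem foldl_enum_spec (l : List Char) : ∀ (k : Int) (front back : List Char),
    PySem.Int.mod k 2 = 0 →
    (PySem.List.enumerate l k).foldl
      (fun (fb : List Char × List Char) (p : Int × Char) =>
        if PySem.Int.mod p.1 2 == 0 then (fb.1 ++ [p.2], fb.2) else (fb.1, fb.2 ++ [p.2]))
      (front, back)
    = (front ++ pvEv l, back ++ pvOd l) := by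
  induction l using pvEv.induct with
  | case1 => intro k front back _; simp [PySem.List.enumerate, pvEv, pvOd]
  | case2 a =>
    intro k front back hk
    simp only [PySem.List.enumerate, List.foldl_cons, List.foldl_nil]
    have e1 : (PySem.Int.mod k 2 == 0) = true := by rw [hk]; rfl
    simp only [e1, if_true]
    simp [pvEv, pvOd]
  | case3 a b r ih =>
    intro k front back hk
    have hk' : PySem.Int.mod (k+1) 2 = 1 := by
      simp only [PySem.Int.mod] at *
      rw [Int.fmod_eq_emod] at *; omega
    have hk'' : PySem.Int.mod (k+2) 2 = 0 := by
      simp only [PySem.Int.mod] at *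
      rw [Int.fmod_eq_emod] at *; omega
    have e1 : (PySem.Int.mod k 2 == 0) = true := by rw [hk]; rfl
    have e2 : (PySem.Int.mod (k+1) 2 == 0) = false := by rw [hk']; rfl
    simp only [PySem.List.enumerate, List.foldl_cons, e1, e2, if_true, Bool.false_eq_true,
      if_false]
    have h2 : k + 1 + 1 = k + 2 := by ring
    rw [h2, ih (k+2) _ _ hk'']
    simp [pvEv, pvOd]

theorem chars_join_nil (ls : List (List Char)) : PySem.Chars.join [] ls = ls.flatten := by
  induction ls with
  | nil => rfl
  | cons a t ih =>
    cases t with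
    | nil => simp [PySem.Chars.join, List.intercalate, List.intersperse]
    | cons b t' =>
      simp only [PySem.Chars.join, List.intercalate, List.intersperse] at *
      simp [ih]

theorem flatten_singletons (l : List Char) :
    (List.map String.toList (List.map (fun c => String.ofList [c]) l)).flatten = l := by
  induction l with
  | nil => rfl
  | cons a t ih => simp_all [Function.comp_def, String.toList_ofList]

theorem join_singletons (l : List Char) :
    PySem.Str.join "" (l.map (fun c => String.ofList [c])) = String.ofList l := by
  have h : PySem.Str.join "" (l.map (fun c => String.ofList [c]))
      = String.ofList (PySem.Chars.join "".toList
          (List.map String.toList (l.map (fun c => String.ofList [c])))) := rfl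
  rw [h]
  congr 1
  have hsep : "".toList = ([] : List Char) := rfl
  rw [hsep, chars_join_nil, flatten_singletons]

-- ===== VERDICT (by name: the statement is the Claim_ definition above) =====
theorem decode_trans_spec : Claim_equal_decode_trans := by
  intro var _
  unfold Spec_decode_trans
  have eA : decode_trans var = PySem.Str.join ""
      (if ((pvLoopA var.toList (List.replicate var.toList.length "") 0 ((var.toList.length : Int) - 1) 0).2.1 ==
           (pvLoopA var.toList (List.replicate var.toList.length "") 0 ((var.toList.length : Int) - 1) 0).2.2.1) = true
       then PySem.List.pySetD
              (pvLoopA var.toList (List.replicate var.toList.length "") 0 ((var.toList.length : Int) - 1) 0).1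
              (pvLoopA var.toList (List.replicate var.toList.length "") 0 ((var.toList.length : Int) - 1) 0).2.1
              (pvCharAt var.toList
                (pvLoopA var.toList (List.replicate var.toList.length "") 0 ((var.toList.length : Int) - 1) 0).2.2.2)
       else (pvLoopA var.toList (List.replicate var.toList.length "") 0 ((var.toList.length : Int) - 1) 0).1) := rfl
  have eB : decode_trans_alt var = String.ofList
      (((PySem.List.enumerate var.toList).foldl
        (fun (fb : List Char × List Char) (p : Int × Char) =>
          if PySem.Int.mod p.1 2 == 0 then (fb.1 ++ [p.2], fb.2) else (fb.1, fb.2 ++ [p.2]))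
        ([], [])).1 ++
       ((PySem.List.enumerate var.toList).foldl
        (fun (fb : List Char × List Char) (p : Int × Char) =>
          if PySem.Int.mod p.1 2 == 0 then (fb.1 ++ [p.2], fb.2) else (fb.1, fb.2 ++ [p.2]))
        ([], [])).2.reverse) := rfl
  have hB := foldl_enum_spec var.toList 0 [] [] (by decide)
  have hA := pvLoopA_spec var.toList.length var.toList [] [] 0 (by omega)
  simp only [List.nil_append, List.append_nil, List.length_nil, Nat.cast_zero, zero_add,
    List.drop_zero, List.take_length] at hA
  rw [eA, eB, hB, hA]
  simp only [List.nil_append]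
  rw [join_singletons, pvDec_eq_ev_od]
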